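-- pv_equiv track=rewrite | github.com/devsaaqib/Virtusa_PreOnBoarding_Training-Saaqib- | Python/Week-2/RangeBasedMatrixBuilder.py | RangeBasedMatrixBuilder
-- ===== SOURCE A (Python) =====
-- def RangeBasedMatrixBuilder(n):
--     matrix = [[0] * n for _ in range(n)]
--
--     for i in range(n):
--         for j in range(n):
--             if i == j:
--                 matrix[i][j] = 1
--             elif j > i:
--                 matrix[i][j] = j - i
--             else:
--                 matrix[i][j] = i - j
--
--     return matrix
-- ===== SOURCE B (Python) =====
-- def RangeBasedMatrixBuilder(n):
--     return [list(range(i, 0, -1)) + [1] + list(range(1, n - i)) for i in range(n)]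
-- ===== Notes on version B (the rewrite author's own statement) =====
-- stated objective: simpler
-- what changed: B builds each row in closed form as a single comprehension concatenating a descending range, the diagonal entry, and an ascending range, replacing A's allocation of a zero matrix followed by nested per-cell loops with a three-way branch and in-place assignment.
import Mathlib
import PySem

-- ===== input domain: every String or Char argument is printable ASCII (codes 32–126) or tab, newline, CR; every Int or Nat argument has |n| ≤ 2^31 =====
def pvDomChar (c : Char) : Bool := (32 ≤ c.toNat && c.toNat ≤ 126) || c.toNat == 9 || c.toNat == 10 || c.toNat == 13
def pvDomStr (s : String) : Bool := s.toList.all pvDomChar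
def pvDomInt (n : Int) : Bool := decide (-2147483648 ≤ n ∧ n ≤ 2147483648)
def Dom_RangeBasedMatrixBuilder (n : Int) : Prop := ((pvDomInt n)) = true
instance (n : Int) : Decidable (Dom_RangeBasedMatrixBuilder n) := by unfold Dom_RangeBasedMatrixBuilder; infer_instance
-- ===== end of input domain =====

-- B builds each row directly as a concatenation of ranges around the diagonal entry, replacing A's
-- nested per-cell loops with a three-way branch and in-place assignment (objective: simpler).

-- ===== PORT A =====
def RangeBasedMatrixBuilder (n : Int) : List (List Int) :=
  let matrix : List (List Int) :=
    (PySem.List.pyRange 0 n 1).map (fun _ => List.replicate n.toNat (0 : Int))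
  (PySem.List.pyRange 0 n 1).foldl (fun matrix i =>
    (PySem.List.pyRange 0 n 1).foldl (fun matrix j =>
      let v : Int := if i = j then 1 else if j > i then j - i else i - j
      PySem.List.pySetD matrix i (PySem.List.pySetD (PySem.List.pyGetD matrix i []) j v)) matrix)
    matrix

-- ===== PORT B =====
def RangeBasedMatrixBuilder_alt (n : Int) : List (List Int) :=
  (PySem.List.pyRange 0 n 1).map (fun i =>
    PySem.List.pyRange i 0 (-1) ++ [1] ++ PySem.List.pyRange 1 (n - i) 1)

-- ===== PRECONDITION & SPEC =====
def Spec_RangeBasedMatrixBuilder (n : Int) (out : List (List Int)) : Prop := out = RangeBasedMatrixBuilder_alt n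
instance (n : Int) (out : List (List Int)) : Decidable (Spec_RangeBasedMatrixBuilder n out) := by unfold Spec_RangeBasedMatrixBuilder; infer_instance

-- ===== CLAIM (what is proved, stated in full; the proofs are below) =====
def Claim_equal_RangeBasedMatrixBuilder : Prop := ∀ (n : Int), Dom_RangeBasedMatrixBuilder n → Spec_RangeBasedMatrixBuilder n (RangeBasedMatrixBuilder n)

-- ===== LEMMAS AND PROOFS =====

-- the value A writes into cell (i, j)
def pvVal (i j : Int) : Int := if i = j then 1 else if j > i then j - i else i - j

-- A's inner loop factored: all its writes happen in row i
theorem pv_inner_factor (js : List Int) (m : List (List Int)) (i : Int)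
    (h0 : 0 ≤ i) (hlt : i.toNat < m.length) :
    js.foldl (fun m j =>
        PySem.List.pySetD m i (PySem.List.pySetD (PySem.List.pyGetD m i []) j (pvVal i j))) m
    = PySem.List.pySetD m i
        (js.foldl (fun r j => PySem.List.pySetD r j (pvVal i j)) (PySem.List.pyGetD m i [])) := by
  induction js generalizing m with
  | nil =>
    simp only [List.foldl_nil]
    rw [PySem.List.pySetD_of_nonneg _ _ h0, PySem.List.pyGetD_eq_getElem _ _ h0 (by omega)]
    exact (List.set_getElem_self hlt).symm
  | cons j rest ih =>
    simp only [List.foldl_cons]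
    rw [ih _ (by rw [PySem.List.length_pySetD]; exact hlt)]
    rw [PySem.List.pySetD_of_nonneg m _ h0,
        PySem.List.pySetD_of_nonneg (m.set i.toNat _) _ h0,
        PySem.List.pySetD_of_nonneg m _ h0,
        List.set_set]
    congr 1
    rw [PySem.List.pyGetD_eq_getElem _ _ h0 (by simp; omega)]
    congr 1
    exact List.getElem_set_self (l := m) (by simp; omega)

-- filling indices of a row with pySetD, read out pointwise
theorem pv_setfold_get (g : Int → Int) (js : List Int) (r : List Int) (k : Nat)
    (hnn : ∀ j ∈ js, 0 ≤ j) :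
    (js.foldl (fun r j => PySem.List.pySetD r j (g j)) r)[k]?
    = if (k : Int) ∈ js then (if k < r.length then some (g k) else none) else r[k]? := by
  induction js generalizing r with
  | nil => simp
  | cons j rest ih =>
    have hj : 0 ≤ j := hnn j (by simp)
    simp only [List.foldl_cons]
    rw [ih _ (fun x hx => hnn x (by simp [hx]))]
    rw [PySem.List.pySetD_of_nonneg _ _ hj]
    by_cases hm : (k : Int) ∈ rest
    · simp [hm, List.length_set]
    · simp only [hm, if_false]
      rw [List.getElem?_set]
      by_cases hkj : (k : Int) = j
      · subst hkj
        simp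
      · have h1 : j.toNat ≠ k := by omega
        simp [h1, List.mem_cons, hkj, hm]

-- a full row fill equals the mapped range
theorem pv_rowfold (n i : Int) (r : List Int) (hr : r.length = n.toNat) :
    (PySem.List.pyRange 0 n 1).foldl (fun r j => PySem.List.pySetD r j (pvVal i j)) r
    = (PySem.List.pyRange 0 n 1).map (pvVal i) := by
  have hrw : PySem.List.pyRange 0 n 1 = PySem.List.pyRange 0 (↑n.toNat) 1 := by
    rw [PySem.List.pyRange_one, PySem.List.pyRange_one]
    congr 2
    omega
  apply List.ext_getElem?
  intro k
  rw [pv_setfold_get _ _ _ _ (fun j hj => (PySem.List.mem_pyRange_one.1 hj).1)]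
  by_cases hk : k < n.toNat
  · rw [if_pos (PySem.List.mem_pyRange_one.2 ⟨by omega, by omega⟩), if_pos (by omega)]
    rw [hrw, PySem.List.getElem?_map_pyRange_zero _ _ _ hk]
  · rw [if_neg (fun h => hk (by have := PySem.List.mem_pyRange_one.1 h; omega))]
    rw [List.getElem?_eq_none (by omega),
        List.getElem?_eq_none (by rw [List.length_map, PySem.List.length_pyRange_one]; omega)]

-- A's outer loop, read out pointwise: row k is transformed exactly once, from its initial value
theorem pv_outer_get (F : List Int → Int → List Int) (is : List Int) (m : List (List Int)) (k : Nat)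
    (hnd : is.Nodup) (hnn : ∀ j ∈ is, 0 ≤ j) (hk : k < m.length) :
    (is.foldl (fun m i => PySem.List.pySetD m i (F (PySem.List.pyGetD m i []) i)) m)[k]?
    = if (k : Int) ∈ is then Option.map (fun r => F r (k : Int)) m[k]? else m[k]? := by
  induction is generalizing m with
  | nil => simp
  | cons i rest ih =>
    have hi : 0 ≤ i := hnn i (by simp)
    simp only [List.foldl_cons]
    rw [ih _ hnd.of_cons (fun x hx => hnn x (by simp [hx]))
        (by rw [PySem.List.length_pySetD]; exact hk)]
    rw [PySem.List.pySetD_of_nonneg _ _ hi]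
    by_cases hm : (k : Int) ∈ rest
    · have hne : (k : Int) ≠ i := fun h => (List.nodup_cons.1 hnd).1 (h ▸ hm)
      have h1 : i.toNat ≠ k := by omega
      rw [if_pos hm, if_pos (by simp [hm]), List.getElem?_set, if_neg h1]
    · rw [if_neg hm, List.getElem?_set]
      by_cases hki : (k : Int) = i
      · subst hki
        simp [hk, hm]
      · have h1 : i.toNat ≠ k := by omega
        rw [if_neg h1, if_neg (by simp [hki, hm])]

theorem pv_pyRange_toNat (n : Int) :
    PySem.List.pyRange 0 n 1 = PySem.List.pyRange 0 (↑n.toNat) 1 := by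
  rw [PySem.List.pyRange_one, PySem.List.pyRange_one]
  congr 2
  omega

theorem pv_outer_len (F : List Int → Int → List Int) (is : List Int) (m : List (List Int)) :
    (is.foldl (fun m i => PySem.List.pySetD m i (F (PySem.List.pyGetD m i []) i)) m).length = m.length := by
  induction is generalizing m with
  | nil => rfl
  | cons i rest ih => simp only [List.foldl_cons]; rw [ih, PySem.List.length_pySetD]

theorem pv_A_outer_factor (n : Int) (is : List Int) (m : List (List Int))
    (h : ∀ i ∈ is, 0 ≤ i ∧ i.toNat < m.length) :
    is.foldl (fun m i => (PySem.List.pyRange 0 n 1).foldl (fun m j => PySem.List.pySetD m i (PySem.List.pySetD (PySem.List.pyGetD m i []) j (pvVal i j))) m) m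
    = is.foldl (fun m i => PySem.List.pySetD m i ((PySem.List.pyRange 0 n 1).foldl (fun r j => PySem.List.pySetD r j (pvVal i j)) (PySem.List.pyGetD m i []))) m := by
  induction is generalizing m with
  | nil => rfl
  | cons i rest ih =>
    simp only [List.foldl_cons]
    rw [pv_inner_factor _ _ _ (h i (by simp)).1 (h i (by simp)).2]
    exact ih _ (fun x hx => ⟨(h x (by simp [hx])).1,
      by rw [PySem.List.length_pySetD]; exact (h x (by simp [hx])).2⟩)

-- characterisation of A: the matrix of pvVal values
theorem pv_A_eq_map (n : Int) :
    RangeBasedMatrixBuilder n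
    = (PySem.List.pyRange 0 n 1).map (fun i => (PySem.List.pyRange 0 n 1).map (pvVal i)) := by
  show (PySem.List.pyRange 0 n 1).foldl (fun m i =>
      (PySem.List.pyRange 0 n 1).foldl (fun m j =>
        PySem.List.pySetD m i (PySem.List.pySetD (PySem.List.pyGetD m i []) j (pvVal i j))) m)
      ((PySem.List.pyRange 0 n 1).map fun _ => List.replicate n.toNat (0 : Int)) = _
  have hlen : ((PySem.List.pyRange 0 n 1).map fun _ => List.replicate n.toNat (0 : Int)).length = n.toNat := by
    rw [List.length_map, PySem.List.length_pyRange_one]; omega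
  rw [pv_A_outer_factor n _ _ (fun i hi => by
    have := PySem.List.mem_pyRange_one.1 hi
    exact ⟨this.1, by rw [hlen]; omega⟩)]
  apply List.ext_getElem?
  intro k
  by_cases hk : k < n.toNat
  · rw [pv_outer_get (fun r i => (PySem.List.pyRange 0 n 1).foldl (fun r j => PySem.List.pySetD r j (pvVal i j)) r)
      (PySem.List.pyRange 0 n 1)
      ((PySem.List.pyRange 0 n 1).map fun _ => List.replicate n.toNat (0 : Int)) k
      (PySem.List.nodup_pyRange_one 0 n)
      (fun j hj => (PySem.List.mem_pyRange_one.1 hj).1) (by rw [hlen]; omega)]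
    rw [if_pos (PySem.List.mem_pyRange_one.2 ⟨by omega, by omega⟩)]
    rw [pv_pyRange_toNat n, PySem.List.getElem?_map_pyRange_zero _ _ _ hk,
        PySem.List.getElem?_map_pyRange_zero _ _ _ hk]
    rw [Option.map_some]
    rw [← pv_pyRange_toNat n, pv_rowfold n _ _ (List.length_replicate)]
  · rw [List.getElem?_eq_none (by
        rw [pv_outer_len (fun r i => (PySem.List.pyRange 0 n 1).foldl (fun r j => PySem.List.pySetD r j (pvVal i j)) r), hlen]; omega),
        List.getElem?_eq_none (by rw [List.length_map, PySem.List.length_pyRange_one]; omega)]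

-- B's row i is exactly A's row i
theorem pv_alt_row (n i : Int) (hi : 0 ≤ i) (hin : i < n) :
    PySem.List.pyRange i 0 (-1) ++ [1] ++ PySem.List.pyRange 1 (n - i) 1
    = (PySem.List.pyRange 0 n 1).map (pvVal i) := by
  rw [PySem.List.pyRange_one_append 0 i n hi (by omega),
      PySem.List.pyRange_one_append i (i+1) n (by omega) (by omega),
      List.map_append, List.map_append, List.append_assoc]
  congr 1
  · rw [PySem.List.pyRange_one 0 i, PySem.List.pyRange_neg_one i 0, List.map_map]
    apply List.map_congr_left
    intro k hk
    rw [List.mem_range] at hk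
    simp only [Function.comp_apply, pvVal]
    rw [if_neg (by omega), if_neg (by omega)]
    omega
  congr 1
  · rw [PySem.List.pyRange_one_singleton]
    simp [pvVal]
  · rw [PySem.List.pyRange_one (i+1) n, PySem.List.pyRange_one 1 (n-i), List.map_map,
        show (n - i - 1).toNat = (n - (i+1)).toNat from by omega]
    apply List.map_congr_left
    intro k hk
    rw [List.mem_range] at hk
    simp only [Function.comp_apply, pvVal]
    rw [if_neg (by omega), if_pos (by omega)]
    omega

-- ===== VERDICT (by name: the statement is the Claim_ definition above) =====
theorem RangeBasedMatrixBuilder_spec : Claim_equal_RangeBasedMatrixBuilder := by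
  intro n _
  show RangeBasedMatrixBuilder n = RangeBasedMatrixBuilder_alt n
  rw [pv_A_eq_map, RangeBasedMatrixBuilder_alt]
  refine List.map_congr_left (fun i hi => ?_)
  rw [PySem.List.mem_pyRange_one] at hi
  exact (pv_alt_row n i hi.1 hi.2).symm
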